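-- pv_equiv track=rewrite | github.com/raniaallegui/MathToGraph | open.py | diviseurs_proches
-- ===== SOURCE A (Python) =====
-- def diviseurs_proches(n):
--     diviseurs = []
--     for i in range(1, int(n**0.5) + 1):
--         if n % i == 0:
--             diviseurs.append(i)
--             diviseurs.append(n // i)
--     diviseurs.sort()
--     i = 0
--     j = len(diviseurs) - 1
--     min_diff = abs(diviseurs[i] - diviseurs[j])
--     min_i = i
--     min_j = j
--     while i < j:
--         diff = abs(diviseurs[i] - diviseurs[j])
--         if diff < min_diff:
--             min_diff = diff
--             min_i = i
--             min_j = j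
--         if diff == 0:
--             break
--         elif diviseurs[i] * diviseurs[j] < n:
--             i += 1
--         else:
--             j -= 1
--     return [diviseurs[min_i], diviseurs[min_j]]
-- ===== SOURCE B (Python) =====
-- def diviseurs_proches(n):
--     diviseurs = [i for i in range(1, int(n**0.5) + 1) if n % i == 0]
--     m = diviseurs[-1]
--     return [m, n // m]
-- ===== Notes on version B (the rewrite author's own statement) =====
-- stated objective: simpler
-- what changed: B keeps only the divisors up to floor(sqrt(n)) and returns the last one with its cofactor directly, dropping A's append-both-sides, sort and two-pointer while-loop entirely.
import Mathlib
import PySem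

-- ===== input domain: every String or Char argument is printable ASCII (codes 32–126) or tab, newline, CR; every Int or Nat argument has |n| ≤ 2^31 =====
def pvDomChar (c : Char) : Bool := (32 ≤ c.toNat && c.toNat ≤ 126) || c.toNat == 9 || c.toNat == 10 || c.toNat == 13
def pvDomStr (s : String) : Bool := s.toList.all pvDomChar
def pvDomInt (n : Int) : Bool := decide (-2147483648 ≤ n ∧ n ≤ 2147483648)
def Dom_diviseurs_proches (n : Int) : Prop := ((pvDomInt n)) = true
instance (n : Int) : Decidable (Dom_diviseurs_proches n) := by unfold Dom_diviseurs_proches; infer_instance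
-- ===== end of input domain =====

-- B drops A's append-both-sides/sort/two-pointer machinery: the answer is the largest divisor ≤ √n with its cofactor (objective: simpler).

-- ===== PORT A =====
-- int(n**0.5) ported as the integer square root: exact for 0 ≤ n ≤ 2^31 (the double sqrt is
-- correctly rounded and (isqrt n + 1)^2 < 2^52 there); for n < 0 Python raises TypeError (outside Pre_).
-- kernel-reducible integer square root (bitwise, 16 bits: exact for every n < 2^32)
def pvISqrtGo (n : Nat) : Nat → Nat → Nat
  | 0, r => r
  | k+1, r => if (r + 2^k) * (r + 2^k) ≤ n then pvISqrtGo n k (r + 2^k) else pvISqrtGo n k r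

def pySqrtInt (n : Int) : Int := (pvISqrtGo n.toNat 16 0 : Int)

-- the 'while i < j' loop; fuel ≥ initial j - i + 1 bounds the iterations; i, j never go negative under Pre_.
def pvLoopA (L : List Int) (n : Int) : Nat → Nat → Nat → Int → Nat → Nat → Nat × Nat
  | 0, _, _, _, mi, mj => (mi, mj)
  | fuel+1, i, j, minDiff, mi, mj =>
    if i < j then
      let diff := |L.getD i 0 - L.getD j 0|
      let st := if diff < minDiff then (diff, i, j) else (minDiff, mi, mj)
      if diff = 0 then (st.2.1, st.2.2)
      else if L.getD i 0 * L.getD j 0 < n then pvLoopA L n fuel (i+1) j st.1 st.2.1 st.2.2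
      else pvLoopA L n fuel i (j-1) st.1 st.2.1 st.2.2
    else (mi, mj)

def diviseurs_proches (n : Int) : List Int :=
  let diviseurs := (PySem.List.pyRange 1 (pySqrtInt n + 1) 1).foldl
      (fun acc i => if PySem.Int.mod n i == 0 then acc ++ [i, PySem.Int.floordiv n i] else acc) []
  let L := PySem.List.sorted diviseurs (fun x => x) false
  let j := L.length - 1
  let minDiff := |L.getD 0 0 - L.getD j 0|
  let r := pvLoopA L n (j + 1) 0 j minDiff 0 j
  [L.getD r.1 0, L.getD r.2 0]

-- ===== PORT B =====
def diviseurs_proches_alt (n : Int) : List Int :=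
  let diviseurs := (PySem.List.pyRange 1 (pySqrtInt n + 1) 1).filter (fun i => PySem.Int.mod n i == 0)
  let m := (PySem.List.pyGet? diviseurs (-1)).getD 0
  [m, PySem.Int.floordiv n m]

-- ===== PRECONDITION & SPEC =====
-- Python A raises on every n ≤ 0 (TypeError on n < 0 from int(n**0.5) of a complex number,
-- IndexError on n = 0 where the divisor list is empty), so Pre_ is exactly n ≥ 1.
def Pre_diviseurs_proches (n : Int) : Prop := 1 ≤ n
instance (n : Int) : Decidable (Pre_diviseurs_proches n) := by unfold Pre_diviseurs_proches; infer_instance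

def pvWitness_diviseurs_proches : Int := (12)

def Spec_diviseurs_proches (n : Int) (out : List Int) : Prop := out = diviseurs_proches_alt n
instance (n : Int) (out : List Int) : Decidable (Spec_diviseurs_proches n out) := by unfold Spec_diviseurs_proches; infer_instance

-- ===== CLAIM (what is proved, stated in full; the proofs are below) =====
def Claim_equal_diviseurs_proches : Prop := ∀ (n : Int), Dom_diviseurs_proches n → Pre_diviseurs_proches n → Spec_diviseurs_proches n (diviseurs_proches n)

-- ===== LEMMAS AND PROOFS =====

-- D: the ascending list of the divisors of n that are ≤ √n (definitionally B's list).
def pvD (n : Int) : List Int :=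
  (PySem.List.pyRange 1 (pySqrtInt n + 1) 1).filter (fun i => PySem.Int.mod n i == 0)

-- L: what A's divisor list sorts to (proved below): D followed by the cofactors in descending order.
def pvL (n : Int) : List Int := pvD n ++ ((pvD n).map (fun d => PySem.Int.floordiv n d)).reverse

lemma pvISqrtGo_sq_le (n : Nat) : ∀ k r, r * r ≤ n → pvISqrtGo n k r * pvISqrtGo n k r ≤ n := by
  intro k
  induction k with
  | zero => intro r h; simpa [pvISqrtGo] using h
  | succ k ih =>
    intro r h
    by_cases hc : (r + 2^k) * (r + 2^k) ≤ n
    · rw [pvISqrtGo, if_pos hc]; exact ih _ hc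
    · rw [pvISqrtGo, if_neg hc]; exact ih _ h

lemma pvISqrtGo_ge (n : Nat) : ∀ k r, r ≤ pvISqrtGo n k r := by
  intro k
  induction k with
  | zero => intro r; simp [pvISqrtGo]
  | succ k ih =>
    intro r
    by_cases hc : (r + 2^k) * (r + 2^k) ≤ n
    · rw [pvISqrtGo, if_pos hc]
      exact le_trans (Nat.le_add_right r (2^k)) (ih (r + 2^k))
    · rw [pvISqrtGo, if_neg hc]; exact ih r

lemma one_le_pvISqrtGo (n : Nat) (hn : 1 ≤ n) : ∀ k r, 1 ≤ k → 1 ≤ pvISqrtGo n k r := by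
  intro k
  induction k with
  | zero => intro r hk; omega
  | succ k ih =>
    intro r _
    by_cases hc : (r + 2^k) * (r + 2^k) ≤ n
    · rw [pvISqrtGo, if_pos hc]
      have h1 : 1 ≤ r + 2^k := by have := Nat.one_le_two_pow (n := k); omega
      exact le_trans h1 (pvISqrtGo_ge n k (r + 2^k))
    · rw [pvISqrtGo, if_neg hc]
      cases k with
      | zero =>
        simp only [pvISqrtGo]
        rcases Nat.eq_zero_or_pos r with rfl | hr
        · simp at hc; omega
        · exact hr
      | succ k' => exact ih r (by omega)

lemma pySqrtInt_sq_le (n : Int) (hn : 0 ≤ n) : pySqrtInt n * pySqrtInt n ≤ n := by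
  have h := pvISqrtGo_sq_le n.toNat 16 0 (by simp)
  unfold pySqrtInt
  have h2 : ((pvISqrtGo n.toNat 16 0 * pvISqrtGo n.toNat 16 0 : Nat) : Int) ≤ (n.toNat : Int) :=
    by exact_mod_cast h
  rw [Int.toNat_of_nonneg hn] at h2
  push_cast at h2
  linarith

lemma one_le_pySqrtInt (n : Int) (hn : 1 ≤ n) : 1 ≤ pySqrtInt n := by
  have h := one_le_pvISqrtGo n.toNat (by omega) 16 0 (by omega)
  unfold pySqrtInt
  exact_mod_cast h

lemma pvD_sorted (n : Int) : (pvD n).Pairwise (· < ·) :=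
  List.Pairwise.filter _ (PySem.List.pairwise_lt_pyRange_one 1 (pySqrtInt n + 1))

lemma pvD_mem (n : Int) (hn : 1 ≤ n) (d : Int) (hd : d ∈ pvD n) :
    1 ≤ d ∧ d ∣ n ∧ d * d ≤ n := by
  unfold pvD at hd
  rw [List.mem_filter] at hd
  obtain ⟨hr, hm⟩ := hd
  rw [PySem.List.mem_pyRange_one] at hr
  have hdvd : d ∣ n := (PySem.Int.mod_eq_zero_iff_dvd n d).mp (by simpa using hm)
  refine ⟨hr.1, hdvd, ?_⟩
  have hs : d ≤ pySqrtInt n := by omega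
  have h2 := pySqrtInt_sq_le n (by omega)
  have hdd : d * d ≤ pySqrtInt n * pySqrtInt n :=
    mul_le_mul hs hs (by omega) (by omega)
  linarith

lemma pvD_le_sqrt (n : Int) (d : Int) (hd : d ∈ pvD n) : d ≤ pySqrtInt n := by
  unfold pvD at hd
  rw [List.mem_filter] at hd
  have := (PySem.List.mem_pyRange_one.mp hd.1)
  omega

lemma pvD_one_mem (n : Int) (hn : 1 ≤ n) : (1 : Int) ∈ pvD n := by
  unfold pvD
  rw [List.mem_filter]
  constructor
  · rw [PySem.List.mem_pyRange_one]
    have h2 := one_le_pySqrtInt n hn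
    omega
  · simp

lemma cofactor_mul (n d : Int) (hd : 1 ≤ d) (hdvd : d ∣ n) :
    PySem.Int.floordiv n d * d = n := by
  rw [PySem.Int.floordiv_eq_ediv_of_pos (by omega : (0:Int) < d)]
  exact Int.ediv_mul_cancel hdvd

lemma cofactor_ge (n d : Int) (hd : 1 ≤ d) (hdvd : d ∣ n) (hsq : d * d ≤ n) :
    d ≤ PySem.Int.floordiv n d := by
  have h := cofactor_mul n d hd hdvd
  nlinarith

lemma cofactor_lt (n d e : Int) (hn : 1 ≤ n) (hd : 1 ≤ d) (hde : d < e)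
    (hdvd : d ∣ n) (hedvd : e ∣ n) :
    PySem.Int.floordiv n e < PySem.Int.floordiv n d := by
  have h1 := cofactor_mul n d hd hdvd
  have h2 := cofactor_mul n e (by omega) hedvd
  have hfd : 0 < PySem.Int.floordiv n d := by
    by_contra hc
    push Not at hc
    nlinarith [mul_le_mul_of_nonneg_right hc (by omega : (0:Int) ≤ d)]
  by_contra hc
  push Not at hc
  have h3 : n < PySem.Int.floordiv n d * e := by
    nlinarith [mul_pos hfd (by omega : (0:Int) < e - d)]
  have h4 : PySem.Int.floordiv n d * e ≤ PySem.Int.floordiv n e * e :=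
    mul_le_mul_of_nonneg_right hc (by omega : (0:Int) ≤ e)
  linarith

-- A's foldl builds exactly the interleaved divisor/cofactor list over D
lemma pvA_list (n : Int) :
    (PySem.List.pyRange 1 (pySqrtInt n + 1) 1).foldl
      (fun acc i => if PySem.Int.mod n i == 0 then acc ++ [i, PySem.Int.floordiv n i] else acc) []
    = (pvD n).flatMap (fun d => [d, PySem.Int.floordiv n d]) := by
  rw [PySem.List.foldl_if_eq_foldl_filter, PySem.List.foldl_append_eq_flatMap]
  simp only [List.nil_append]
  unfold pvD
  rfl

lemma flatMap_interleave (g : Int → Int) :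
    ∀ l : List Int, (l ++ (l.map g).reverse).Perm (l.flatMap fun d => [d, g d])
  | [] => by simp
  | d :: l => by
    simp only [List.map_cons, List.reverse_cons, List.flatMap_cons, List.cons_append]
    refine List.Perm.cons d ?_
    rw [show l ++ ((l.map g).reverse ++ [g d]) = (l ++ (l.map g).reverse) ++ [g d] from
      (List.append_assoc _ _ _).symm]
    exact (List.perm_append_singleton _ _).trans ((flatMap_interleave g l).cons _)

lemma pvL_pairwise (n : Int) (hn : 1 ≤ n) : (pvL n).Pairwise (· ≤ ·) := by
  unfold pvL
  rw [List.pairwise_append]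
  refine ⟨(pvD_sorted n).imp le_of_lt, ?_, ?_⟩
  · rw [List.pairwise_reverse]
    refine List.Pairwise.map _ (fun a b h => h) ?_
    refine List.Pairwise.imp_of_mem ?_ (pvD_sorted n)
    intro a b ha hb hab
    have hA := pvD_mem n hn a ha
    have hB := pvD_mem n hn b hb
    exact le_of_lt (cofactor_lt n a b hn hA.1 hab hA.2.1 hB.2.1)
  · intro a ha b hb
    rw [List.mem_reverse, List.mem_map] at hb
    obtain ⟨e, he, rfl⟩ := hb
    have hA := pvD_mem n hn a ha
    have hE := pvD_mem n hn e he
    have hsa := pvD_le_sqrt n a ha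
    have hse := pvD_le_sqrt n e he
    have hmul := cofactor_mul n e hE.1 hE.2.1
    have hsq : pySqrtInt n * pySqrtInt n ≤ n := pySqrtInt_sq_le n (by omega)
    have h5 : a * e ≤ pySqrtInt n * pySqrtInt n := mul_le_mul hsa hse (by omega) (by omega)
    have h6 : a * e ≤ PySem.Int.floordiv n e * e := by linarith
    exact le_of_mul_le_mul_right h6 (by omega)

lemma pvSorted_eq (n : Int) (hn : 1 ≤ n) :
    PySem.List.sorted ((pvD n).flatMap (fun d => [d, PySem.Int.floordiv n d])) (fun x => x) false
      = pvL n := by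
  apply PySem.List.sorted_id_eq_of_perm_of_pairwise
  · exact flatMap_interleave _ (pvD n)
  · exact pvL_pairwise n hn

lemma pvL_length (n : Int) : (pvL n).length = 2 * (pvD n).length := by
  unfold pvL; simp; omega

lemma pvL_getD_lo (n : Int) (t : Nat) (ht : t < (pvD n).length) :
    (pvL n).getD t 0 = (pvD n).getD t 0 := by
  unfold pvL
  exact List.getD_append _ _ _ _ ht

lemma rev_getD (M : List Int) (t : Nat) (ht : t < M.length) :
    M.reverse.getD (M.length - 1 - t) 0 = M.getD t 0 := by
  have hb : M.length - 1 - t < M.reverse.length := by simp; omega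
  rw [List.getD_eq_getElem _ _ hb, List.getD_eq_getElem _ _ ht]
  exact (List.getElem_eq_getElem_reverse ht).symm

lemma pvL_getD_hi (n : Int) (t : Nat) (ht : t < (pvD n).length) :
    (pvL n).getD (2 * (pvD n).length - 1 - t) 0
      = PySem.Int.floordiv n ((pvD n).getD t 0) := by
  unfold pvL
  rw [List.getD_append_right _ _ _ _ (by omega : (pvD n).length ≤ 2 * (pvD n).length - 1 - t)]
  have hM : ((pvD n).map (fun d => PySem.Int.floordiv n d)).length = (pvD n).length := by simp
  rw [show 2 * (pvD n).length - 1 - t - (pvD n).length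
      = ((pvD n).map (fun d => PySem.Int.floordiv n d)).length - 1 - t from by rw [hM]; omega]
  rw [rev_getD _ t (by rw [hM]; omega)]
  rw [List.getD_eq_getElem _ _ (by rw [hM]; omega), List.getElem_map,
      List.getD_eq_getElem _ _ ht]

lemma pvD_getD_facts (n : Int) (hn : 1 ≤ n) (t : Nat) (ht : t < (pvD n).length) :
    1 ≤ (pvD n).getD t 0 ∧ (pvD n).getD t 0 ∣ n ∧ (pvD n).getD t 0 * (pvD n).getD t 0 ≤ n := by
  have hmem : (pvD n).getD t 0 ∈ pvD n := by
    rw [List.getD_eq_getElem _ _ ht]; exact List.getElem_mem ht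
  exact pvD_mem n hn _ hmem

lemma pvD_getD_lt (n : Int) (t u : Nat) (htu : t < u) (hu : u < (pvD n).length) :
    (pvD n).getD t 0 < (pvD n).getD u 0 := by
  rw [List.getD_eq_getElem _ _ (by omega), List.getD_eq_getElem _ _ hu]
  exact List.pairwise_iff_getElem.mp (pvD_sorted n) t u (by omega) hu htu

-- every divisor below the last one is strictly below its cofactor
lemma pvD_lt_cofactor (n : Int) (hn : 1 ≤ n) (t : Nat) (ht : t + 1 < (pvD n).length) :
    (pvD n).getD t 0 < PySem.Int.floordiv n ((pvD n).getD t 0) := by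
  have hd := pvD_getD_facts n hn t (by omega)
  have he := pvD_getD_facts n hn ((pvD n).length - 1) (by omega)
  have hlt := pvD_getD_lt n t ((pvD n).length - 1) (by omega) (by omega)
  have hmul := cofactor_mul n _ hd.1 hd.2.1
  nlinarith [hd.1, he.1, he.2.2]

-- one unfolding of the while loop
lemma pvLoopA_succ (L : List Int) (n : Int) (f i j : Nat) (minDiff : Int) (mi mj : Nat) :
    pvLoopA L n (f+1) i j minDiff mi mj =
      if i < j then
        let diff := |L.getD i 0 - L.getD j 0|
        let st := if diff < minDiff then (diff, i, j) else (minDiff, mi, mj)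
        if diff = 0 then (st.2.1, st.2.2)
        else if L.getD i 0 * L.getD j 0 < n then pvLoopA L n f (i+1) j st.1 st.2.1 st.2.2
        else pvLoopA L n f i (j-1) st.1 st.2.1 st.2.2
      else (mi, mj) := rfl

-- the main loop invariant: from state (t, 2k-1-t) the loop returns (k-1, k)
lemma pvLoopA_main (n : Int) (hn : 1 ≤ n) :
    ∀ c t minDiff mi mj fuel,
      t + c + 1 = (pvD n).length →
      2 * c + 2 ≤ fuel →
      PySem.Int.floordiv n ((pvD n).getD t 0) - (pvD n).getD t 0 ≤ minDiff →
      (minDiff = PySem.Int.floordiv n ((pvD n).getD t 0) - (pvD n).getD t 0 →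
        mi = t ∧ mj = 2 * (pvD n).length - 1 - t) →
      pvLoopA (pvL n) n fuel t (2 * (pvD n).length - 1 - t) minDiff mi mj
        = ((pvD n).length - 1, (pvD n).length) := by
  intro c
  induction c with
  | zero =>
    intro t minDiff mi mj fuel hk hfuel hge himp
    obtain ⟨f, rfl⟩ : ∃ f, fuel = f + 1 + 1 := ⟨fuel - 2, by omega⟩
    have ht : t < (pvD n).length := by omega
    have hd := pvD_getD_facts n hn t ht
    have hmul := cofactor_mul n _ hd.1 hd.2.1
    have hdle := cofactor_ge n _ hd.1 hd.2.1 hd.2.2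
    have hlo := pvL_getD_lo n t ht
    have hhi := pvL_getD_hi n t ht
    rw [pvLoopA_succ, if_pos (by omega : t < 2 * (pvD n).length - 1 - t)]
    simp only [hlo, hhi]
    have habs : |(pvD n).getD t 0 - PySem.Int.floordiv n ((pvD n).getD t 0)| =
        PySem.Int.floordiv n ((pvD n).getD t 0) - (pvD n).getD t 0 := by
      rw [abs_sub_comm]; exact abs_of_nonneg (by omega)
    have hst : (if PySem.Int.floordiv n ((pvD n).getD t 0) - (pvD n).getD t 0 < minDiff
        then (PySem.Int.floordiv n ((pvD n).getD t 0) - (pvD n).getD t 0, t, 2 * (pvD n).length - 1 - t)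
        else (minDiff, mi, mj))
        = (PySem.Int.floordiv n ((pvD n).getD t 0) - (pvD n).getD t 0, t, 2 * (pvD n).length - 1 - t) := by
      by_cases h : PySem.Int.floordiv n ((pvD n).getD t 0) - (pvD n).getD t 0 < minDiff
      · rw [if_pos h]
      · have heq : minDiff = PySem.Int.floordiv n ((pvD n).getD t 0) - (pvD n).getD t 0 :=
          le_antisymm (not_lt.mp h) hge
        rw [if_neg (by omega), heq, (himp heq).1, (himp heq).2]
    simp only [habs, hst]
    by_cases h0 : PySem.Int.floordiv n ((pvD n).getD t 0) - (pvD n).getD t 0 = 0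
    · rw [if_pos h0]
      simp only [Prod.mk.injEq]
      omega
    · rw [if_neg h0]
      have hcomm : (pvD n).getD t 0 * PySem.Int.floordiv n ((pvD n).getD t 0) = n := by
        rw [mul_comm]; exact hmul
      rw [if_neg (by omega : ¬ (pvD n).getD t 0 * PySem.Int.floordiv n ((pvD n).getD t 0) < n)]
      rw [show 2 * (pvD n).length - 1 - t - 1 = t from by omega]
      rw [pvLoopA_succ, if_neg (lt_irrefl t)]
      simp only [Prod.mk.injEq]
      omega
  | succ c ih =>
    intro t minDiff mi mj fuel hk hfuel hge himp
    obtain ⟨f, rfl⟩ : ∃ f, fuel = f + 1 + 1 := ⟨fuel - 2, by omega⟩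
    have ht : t < (pvD n).length := by omega
    have ht1 : t + 1 < (pvD n).length := by omega
    have hd := pvD_getD_facts n hn t ht
    have he := pvD_getD_facts n hn (t+1) ht1
    have hdlt := pvD_getD_lt n t (t+1) (by omega) ht1
    have hmul := cofactor_mul n _ hd.1 hd.2.1
    have hemul := cofactor_mul n _ he.1 he.2.1
    have hdle := cofactor_ge n _ hd.1 hd.2.1 hd.2.2
    have hele := cofactor_ge n _ he.1 he.2.1 he.2.2
    have hdgd := pvD_lt_cofactor n hn t (by omega)
    have hglt := cofactor_lt n ((pvD n).getD t 0) ((pvD n).getD (t+1) 0) hn hd.1 hdlt hd.2.1 he.2.1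
    have hlo := pvL_getD_lo n t ht
    have hhi := pvL_getD_hi n t ht
    have hhi2 := pvL_getD_hi n (t+1) ht1
    rw [pvLoopA_succ, if_pos (by omega : t < 2 * (pvD n).length - 1 - t)]
    simp only [hlo, hhi]
    have habs : |(pvD n).getD t 0 - PySem.Int.floordiv n ((pvD n).getD t 0)| =
        PySem.Int.floordiv n ((pvD n).getD t 0) - (pvD n).getD t 0 := by
      rw [abs_sub_comm]; exact abs_of_nonneg (by omega)
    have hst : (if PySem.Int.floordiv n ((pvD n).getD t 0) - (pvD n).getD t 0 < minDiff
        then (PySem.Int.floordiv n ((pvD n).getD t 0) - (pvD n).getD t 0, t, 2 * (pvD n).length - 1 - t)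
        else (minDiff, mi, mj))
        = (PySem.Int.floordiv n ((pvD n).getD t 0) - (pvD n).getD t 0, t, 2 * (pvD n).length - 1 - t) := by
      by_cases h : PySem.Int.floordiv n ((pvD n).getD t 0) - (pvD n).getD t 0 < minDiff
      · rw [if_pos h]
      · have heq : minDiff = PySem.Int.floordiv n ((pvD n).getD t 0) - (pvD n).getD t 0 :=
          le_antisymm (not_lt.mp h) hge
        rw [if_neg (by omega), heq, (himp heq).1, (himp heq).2]
    simp only [habs, hst]
    rw [if_neg (by omega : ¬ PySem.Int.floordiv n ((pvD n).getD t 0) - (pvD n).getD t 0 = 0)]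
    have hcomm : (pvD n).getD t 0 * PySem.Int.floordiv n ((pvD n).getD t 0) = n := by
      rw [mul_comm]; exact hmul
    rw [if_neg (by omega : ¬ (pvD n).getD t 0 * PySem.Int.floordiv n ((pvD n).getD t 0) < n)]
    rw [show 2 * (pvD n).length - 1 - t - 1 = 2 * (pvD n).length - 1 - (t+1) from by omega]
    rw [pvLoopA_succ, if_pos (by omega : t < 2 * (pvD n).length - 1 - (t+1))]
    simp only [hlo, hhi2]
    have habs2 : |(pvD n).getD t 0 - PySem.Int.floordiv n ((pvD n).getD (t+1) 0)| =
        PySem.Int.floordiv n ((pvD n).getD (t+1) 0) - (pvD n).getD t 0 := by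
      rw [abs_sub_comm]; exact abs_of_nonneg (by omega)
    have hst2 : (if PySem.Int.floordiv n ((pvD n).getD (t+1) 0) - (pvD n).getD t 0 <
          PySem.Int.floordiv n ((pvD n).getD t 0) - (pvD n).getD t 0
        then (PySem.Int.floordiv n ((pvD n).getD (t+1) 0) - (pvD n).getD t 0, t, 2 * (pvD n).length - 1 - (t+1))
        else (PySem.Int.floordiv n ((pvD n).getD t 0) - (pvD n).getD t 0, t, 2 * (pvD n).length - 1 - t))
        = (PySem.Int.floordiv n ((pvD n).getD (t+1) 0) - (pvD n).getD t 0, t, 2 * (pvD n).length - 1 - (t+1)) := by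
      rw [if_pos (by omega)]
    simp only [habs2, hst2]
    rw [if_neg (by omega : ¬ PySem.Int.floordiv n ((pvD n).getD (t+1) 0) - (pvD n).getD t 0 = 0)]
    rw [if_pos (show (pvD n).getD t 0 * PySem.Int.floordiv n ((pvD n).getD (t+1) 0) < n by nlinarith)]
    exact ih (t+1) (PySem.Int.floordiv n ((pvD n).getD (t+1) 0) - (pvD n).getD t 0) t
      (2 * (pvD n).length - 1 - (t+1)) f (by omega) (by omega) (by omega)
      (fun h => absurd h (by omega))

-- ===== VERDICT (by name: the statement is the Claim_ definition above) =====
theorem diviseurs_proches_spec : Claim_equal_diviseurs_proches := by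
  unfold Claim_equal_diviseurs_proches
  intro n _ hpre
  unfold Spec_diviseurs_proches
  have hn : 1 ≤ n := hpre
  have hne : pvD n ≠ [] := fun h => by simpa [h] using pvD_one_mem n hn
  have hkpos : 0 < (pvD n).length := by
    cases hD : pvD n with
    | nil => exact absurd hD hne
    | cons a l => simp
  simp only [diviseurs_proches, diviseurs_proches_alt]
  rw [pvA_list n, pvSorted_eq n hn]
  rw [show (PySem.List.pyRange 1 (pySqrtInt n + 1) 1).filter (fun i => PySem.Int.mod n i == 0) = pvD n from rfl]
  rw [pvL_length n]
  have hd0 := pvD_getD_facts n hn 0 hkpos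
  have hdle0 := cofactor_ge n _ hd0.1 hd0.2.1 hd0.2.2
  have hlo0 := pvL_getD_lo n 0 hkpos
  have hhi0 : (pvL n).getD (2 * (pvD n).length - 1) 0
      = PySem.Int.floordiv n ((pvD n).getD 0 0) := pvL_getD_hi n 0 hkpos
  rw [hlo0, hhi0]
  have habs0 : |(pvD n).getD 0 0 - PySem.Int.floordiv n ((pvD n).getD 0 0)| =
      PySem.Int.floordiv n ((pvD n).getD 0 0) - (pvD n).getD 0 0 := by
    rw [abs_sub_comm]; exact abs_of_nonneg (by omega)
  rw [habs0]
  have hmain := pvLoopA_main n hn ((pvD n).length - 1) 0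
    (PySem.Int.floordiv n ((pvD n).getD 0 0) - (pvD n).getD 0 0) 0
    (2 * (pvD n).length - 1) (2 * (pvD n).length - 1 + 1)
    (by omega) (by omega) (le_refl _)
    (fun _ => ⟨rfl, by omega⟩)
  rw [show 2 * (pvD n).length - 1 - 0 = 2 * (pvD n).length - 1 from rfl] at hmain
  rw [hmain]
  have hkm1 : (pvD n).length - 1 < (pvD n).length := by omega
  have hlok := pvL_getD_lo n ((pvD n).length - 1) hkm1
  have hk2 : (pvL n).getD ((pvD n).length) 0
      = PySem.Int.floordiv n ((pvD n).getD ((pvD n).length - 1) 0) := by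
    have h := pvL_getD_hi n ((pvD n).length - 1) hkm1
    rwa [show 2 * (pvD n).length - 1 - ((pvD n).length - 1) = (pvD n).length from by omega] at h
  have hB : (PySem.List.pyGet? (pvD n) (-1)).getD 0 = (pvD n).getD ((pvD n).length - 1) 0 := by
    rw [PySem.List.pyGet?_neg_one, List.getLast?_eq_some_getLast hne]
    rw [List.getD_eq_getElem _ _ hkm1]
    simp [List.getLast_eq_getElem]
  simp only [hlok, hk2, hB]
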